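-- pv_equiv track=rewrite | github.com/bntre/BlueBall | game.py | split_text_to_cell_map
-- ===== SOURCE A (Python) =====
-- def split_text_to_cells(text, cell_width = 4):
--     "multiline text -> [[cell]]"
--     arr = []
--     text = text.replace('\r\n', '\n')
--     for line in text.strip('\n').split('\n'):
--         a = []
--         while line:
--             cell = line[:cell_width]
--             line = line[cell_width:]
--             a.append(cell.strip())
--         arr.append(a)
--     return arr
--
-- def split_text_to_cell_map(text, cell_width = 4):
--     "multiline text -> { cell => (i,j) }"
--     arr = split_text_to_cells(text, cell_width)
--     m = {}
--     for (i,a) in enumerate(arr):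
--      for (j,cell) in enumerate(a):
--         if cell:
--             m[cell] = (i,j)
--     return m
-- ===== SOURCE B (Python) =====
-- def split_text_to_cell_map(text, cell_width = 4):
--     "multiline text -> { cell => (i,j) }"
--     m = {}
--     lines = text.replace('\r\n', '\n').strip('\n').split('\n')
--     for i, line in enumerate(lines):
--         for j, start in enumerate(range(0, len(line), cell_width)):
--             cell = line[start:start+cell_width].strip()
--             if cell:
--                 m[cell] = (i, j)
--     return m
-- ===== Notes on version B (the rewrite author's own statement) =====
-- stated objective: simpler
-- what changed: B fuses A's two phases into one pass: instead of consuming each line by repeated reslicing into an intermediate list-of-lists and then rescanning it with enumerate, B slices each line by absolute index over range(0, len(line), cell_width) and writes m[cell] = (i, j) directly; Pre_ excludes cell_width <= 0, on which A's while loop never terminates for any nonempty line (A returns {} only on degenerate all-empty-line texts) and B's range raises ValueError when cell_width = 0.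
-- outside the precondition, e.g. on split_text_to_cell_map('', 0): A returns {}, B raises ValueError
import Mathlib
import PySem

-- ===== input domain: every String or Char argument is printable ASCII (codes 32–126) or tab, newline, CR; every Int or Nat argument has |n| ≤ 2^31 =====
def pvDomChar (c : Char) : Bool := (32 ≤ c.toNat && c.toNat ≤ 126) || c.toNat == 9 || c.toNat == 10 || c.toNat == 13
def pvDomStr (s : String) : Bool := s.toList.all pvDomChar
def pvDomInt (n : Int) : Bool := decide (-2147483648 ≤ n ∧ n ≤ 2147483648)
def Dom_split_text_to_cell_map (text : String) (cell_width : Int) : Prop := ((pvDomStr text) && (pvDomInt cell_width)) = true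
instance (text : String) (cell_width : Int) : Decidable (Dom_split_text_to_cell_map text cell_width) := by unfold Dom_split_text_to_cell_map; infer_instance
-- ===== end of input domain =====

-- B folds A's two phases into one pass: it slices each line by absolute index over
-- range(0, len(line), cell_width) and fills the dict directly, never building A's
-- intermediate list-of-lists of cells (objective: simpler; same asymptotic cost).

-- ===== PORT A =====
-- the `while line:` loop of split_text_to_cells; fuel = initial line length (enough when cell_width ≥ 1)
def pvCellsLoop (cw : Int) : Nat → List Char → List (List Char) → List (List Char)
  | 0, _, acc => acc
  | fuel+1, line, acc =>
    if line.isEmpty then acc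
    else pvCellsLoop cw fuel (PySem.List.slice line (some cw) none)
           (acc ++ [PySem.Chars.strip (PySem.List.slice line none (some cw))])

def split_text_to_cells (text : String) (cell_width : Int) : List (List (List Char)) :=
  let t := PySem.Chars.replace text.toList ['\r', '\n'] ['\n']
  (PySem.Chars.splitOn (PySem.Chars.stripChars t ['\n']) ['\n']).map
    (fun line => pvCellsLoop cell_width line.length line [])

def split_text_to_cell_map (text : String) (cell_width : Int) : List (String × Int × Int) :=
  let arr := split_text_to_cells text cell_width
  ((PySem.List.enumerate arr).foldl
    (fun m p => (PySem.List.enumerate p.2).foldl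
      (fun m q => if q.2.isEmpty then m else m.insert (String.ofList q.2) (p.1, q.1)) m)
    PySem.Dict.empty).items

-- ===== PORT B =====
def split_text_to_cell_map_alt (text : String) (cell_width : Int) : List (String × Int × Int) :=
  let lines := PySem.Chars.splitOn
      (PySem.Chars.stripChars (PySem.Chars.replace text.toList ['\r', '\n'] ['\n']) ['\n']) ['\n']
  ((PySem.List.enumerate lines).foldl
    (fun m p =>
      (PySem.List.enumerate (PySem.List.pyRange 0 (p.2.length : Int) cell_width)).foldl
        (fun m q =>
          let cell := PySem.Chars.strip (PySem.List.slice p.2 (some q.2) (some (q.2 + cell_width)))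
          if cell.isEmpty then m else m.insert (String.ofList cell) (p.1, q.1)) m)
    PySem.Dict.empty).items

-- ===== PRECONDITION & SPEC =====
-- Pre_ excludes cell_width ≤ 0: there A's `while line:` loop never terminates on any nonempty
-- line (A returns — the trivial {} — only on texts whose stripped lines are all empty),
-- while B's range(0, len(line), cell_width) raises ValueError when cell_width = 0.
def Pre_split_text_to_cell_map (text : String) (cell_width : Int) : Prop := 1 ≤ cell_width
instance (text : String) (cell_width : Int) : Decidable (Pre_split_text_to_cell_map text cell_width) := by unfold Pre_split_text_to_cell_map; infer_instance
def pvWitness_split_text_to_cell_map : String × Int := ("ab  cd\n  x ", 4)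

def Spec_split_text_to_cell_map (text : String) (cell_width : Int) (out : List (String × Int × Int)) : Prop := out = split_text_to_cell_map_alt text cell_width
instance (text : String) (cell_width : Int) (out : List (String × Int × Int)) : Decidable (Spec_split_text_to_cell_map text cell_width out) := by unfold Spec_split_text_to_cell_map; infer_instance

-- ===== CLAIM (what is proved, stated in full; the proofs are below) =====
def Claim_equal_split_text_to_cell_map : Prop := ∀ (text : String) (cell_width : Int), Dom_split_text_to_cell_map text cell_width → Pre_split_text_to_cell_map text cell_width → Spec_split_text_to_cell_map text cell_width (split_text_to_cell_map text cell_width)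

-- ===== LEMMAS AND PROOFS =====

theorem pv_pyRange_nonpos (b cw : Int) (hcw : 0 < cw) (hb : b ≤ 0) :
    PySem.List.pyRange 0 b cw = [] := by
  rw [PySem.List.pyRange_of_pos _ _ hcw, if_neg (by omega)]
  simp

-- range(0, n, cw) for 0 < n starts with 0 and continues with the range for the rest, shifted
theorem pv_chunk_range (cw n : Int) (hcw : 1 ≤ cw) (hn : 0 < n) :
    PySem.List.pyRange 0 n cw = 0 :: (PySem.List.pyRange 0 (n - cw) cw).map (· + cw) := by
  rw [PySem.List.pyRange_of_pos _ _ (by omega : (0:Int) < cw),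
      PySem.List.pyRange_of_pos _ _ (by omega : (0:Int) < cw)]
  have hdiv : (n - 0 + cw - 1) / cw = (n - cw - 0 + cw - 1) / cw + 1 := by
    have h1 : n - 0 + cw - 1 = (n - cw - 0 + cw - 1) + 1 * cw := by ring
    rw [h1, Int.add_mul_ediv_right _ _ (by omega : cw ≠ 0)]
  by_cases hc : cw < n
  · have hq : 0 ≤ (n - cw - 0 + cw - 1) / cw := Int.ediv_nonneg (by omega) (by omega)
    rw [if_pos (by omega), if_pos (by omega), hdiv]
    rw [Int.toNat_add hq (by omega)]
    have : ((n - cw - 0 + cw - 1) / cw).toNat + Int.toNat 1 = ((n - cw - 0 + cw - 1) / cw).toNat + 1 := by omega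
    rw [this, List.range_succ_eq_map]
    simp only [List.map_cons, List.map_map]
    congr 1
    · simp
    apply List.map_congr_left
    intro k _
    simp [Nat.succ_eq_add_one]
    ring
  · have h0 : (n - cw - 0 + cw - 1) / cw = 0 := by
      apply Int.ediv_eq_zero_of_lt <;> omega
    rw [if_pos (by omega), if_neg (by omega), hdiv, h0]
    simp

-- A's while-loop over one line produces exactly B's absolute-index chunks of that line
theorem pv_cells_eq (cw : Int) (hcw : 1 ≤ cw) :
    ∀ (fuel : Nat) (line : List Char) (acc : List (List Char)), line.length ≤ fuel →
    pvCellsLoop cw fuel line acc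
      = acc ++ (PySem.List.pyRange 0 (line.length : Int) cw).map
          (fun s => PySem.Chars.strip (PySem.List.slice line (some s) (some (s + cw)))) := by
  intro fuel
  induction fuel with
  | zero =>
    intro line acc h
    have : line = [] := List.length_eq_zero_iff.mp (by omega)
    subst this
    simp [pvCellsLoop]
    exact pv_pyRange_nonpos _ _ (by omega) (by omega)
  | succ fuel ih =>
    intro line acc h
    by_cases hl : line.isEmpty
    · have : line = [] := by simpa using hl
      subst this
      simp [pvCellsLoop]
      exact pv_pyRange_nonpos _ _ (by omega) (by omega)
    · have hne : line ≠ [] := by simpa using hl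
      have hn : 0 < (line.length : Int) := by
        have := List.length_pos_iff.mpr hne; omega
      rw [pvCellsLoop, if_neg (by simpa using hl)]
      rw [PySem.List.slice_from line (by omega : (0:Int) ≤ cw)]
      rw [ih _ _ (by simp; omega)]
      rw [pv_chunk_range cw _ hcw hn]
      simp only [List.map_cons, List.map_map, List.append_assoc, List.singleton_append]
      congr 1
      congr 1
      · rw [PySem.List.slice_toNat line (by omega) (by omega : (0:Int) ≤ 0 + cw),
            PySem.List.slice_to line (by omega : (0:Int) ≤ cw)]
        simp
      · by_cases hc : cw ≤ (line.length : Int)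
        · have hlen : ((line.drop cw.toNat).length : Int) = (line.length : Int) - cw := by
            simp [List.length_drop]; omega
          rw [hlen]
          apply List.map_congr_left
          intro s hs
          have hs0 : 0 ≤ s := by
            rcases (PySem.List.mem_pyRange_iff_of_pos (by omega : (0:Int) < cw) s).mp hs with ⟨h1, _, _⟩
            omega
          simp only [Function.comp]
          rw [PySem.List.slice_toNat _ (by omega) (by omega : (0:Int) ≤ s + cw + cw),
              PySem.List.slice_toNat _ (by omega) (by omega : (0:Int) ≤ s + cw)]
          rw [List.drop_drop]
          have e1 : (s + cw).toNat = s.toNat + cw.toNat := by omega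
          have e2 : (s + cw + cw).toNat - (s + cw).toNat = (s + cw).toNat - s.toNat := by omega
          rw [e2, e1, Nat.add_comm cw.toNat s.toNat]
        · have h1 : ((line.drop cw.toNat).length : Int) = 0 := by
            simp [List.length_drop]; omega
          rw [h1, pv_pyRange_nonpos _ _ (by omega) (by omega),
              pv_pyRange_nonpos _ _ (by omega) (by omega)]
          simp

theorem pv_enumerate_map {α β : Type} (f : α → β) (xs : List α) (s : Int) :
    PySem.List.enumerate (xs.map f) s = (PySem.List.enumerate xs s).map (fun p => (p.1, f p.2)) := by
  induction xs generalizing s with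
  | nil => simp [PySem.List.enumerate_nil]
  | cons x xs ih => simp [PySem.List.enumerate_cons, ih]

-- ===== VERDICT (by name: the statement is the Claim_ definition above) =====
theorem split_text_to_cell_map_spec : Claim_equal_split_text_to_cell_map := by
  intro text cw _hdom hpre
  unfold Spec_split_text_to_cell_map
  unfold split_text_to_cell_map split_text_to_cell_map_alt split_text_to_cells
  simp only []
  congr 1
  rw [pv_enumerate_map, List.foldl_map]
  apply PySem.List.foldl_congr_mem
  intro m p _
  rw [pv_cells_eq cw hpre p.2.length p.2 [] le_rfl, List.nil_append]
  rw [pv_enumerate_map, List.foldl_map]
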